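-- pv_equiv track=rewrite | github.com/mallocchio/Advanced-Topics-In-Cybersecurity | Lab Sheet - Making (symmetric) crypto/structural_attacks/diff_cryptanalysis_8bit.py | difference_distribution_table
-- ===== SOURCE A (Python) =====
-- def difference_distribution_table(sbox):
--
--     d_dist_table= [[0 for row in range(len(sbox))] for col in range(len(sbox))]
--     for x in range(len(sbox)):
--         for x_d in range(len(sbox)):
--             d_in = x ^ x_d
--
--             y = sbox[x]
--             y_d = sbox[x_d]
--             d_out = y ^ y_d
--
--             d_dist_table[d_in][d_out] = d_dist_table[d_in][d_out] +1
--
--     return d_dist_table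
-- ===== SOURCE B (Python) =====
-- def difference_distribution_table(sbox):
--     n = len(sbox)
--     table = [[0] * n for _ in range(n)]
--     if n:
--         table[0][0] = n
--     for x in range(n):
--         for x_d in range(x + 1, n):
--             table[x ^ x_d][sbox[x] ^ sbox[x_d]] += 2
--     return table
-- ===== Notes on version B (the rewrite author's own statement) =====
-- stated objective: alternative
-- what changed: B exploits the symmetry of the table update under swapping x and x_d: the diagonal is handled in closed form (table[0][0] = n, since x^x = 0 and sbox[x]^sbox[x] = 0) and only unordered pairs x < x_d are visited, adding 2 per pair, so the pair loop does half the iterations of A's full ordered double loop.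
import Mathlib
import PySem

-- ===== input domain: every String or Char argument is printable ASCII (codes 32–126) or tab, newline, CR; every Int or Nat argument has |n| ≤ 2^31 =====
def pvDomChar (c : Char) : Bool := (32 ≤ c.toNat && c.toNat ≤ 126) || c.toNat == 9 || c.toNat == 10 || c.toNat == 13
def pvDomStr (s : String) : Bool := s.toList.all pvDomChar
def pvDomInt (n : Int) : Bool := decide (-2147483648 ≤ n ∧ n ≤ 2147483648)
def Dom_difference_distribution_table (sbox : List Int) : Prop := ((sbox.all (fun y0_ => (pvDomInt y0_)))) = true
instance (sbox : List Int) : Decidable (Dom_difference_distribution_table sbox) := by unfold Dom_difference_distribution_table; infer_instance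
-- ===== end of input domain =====

-- B exploits the symmetry of the update under swapping x and x_d: the diagonal contributes
-- table[0][0] = n in closed form and each unordered pair x < x_d is visited once with increment 2,
-- so the pair loop runs half of A's iterations; same return value on Pre_.

-- ===== PORT A =====
-- Literal port of A: zero n×n table, double loop over x and x_d, increment at (x^x_d, sbox[x]^sbox[x_d]).
-- Python's negative column index (wraps from the end) is ported by hand as `if j < 0 then j + n else j`;
-- exact under Pre_, which bounds every column index to [-n, n).
def difference_distribution_table (sbox : List Int) : List (List Int) :=
  let n := sbox.length
  let init : List (List Int) := (List.range n).map (fun _ => (List.range n).map (fun _ => (0 : Int)))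
  (List.range n).foldl (fun t (x : Nat) =>
    (List.range n).foldl (fun t (xd : Nat) =>
      let dIn := x ^^^ xd
      let y := PySem.List.pyGetD sbox (x : Int) 0
      let yd := PySem.List.pyGetD sbox (xd : Int) 0
      let dOut := (let j := PySem.Int.bxor y yd; if j < 0 then j + (n : Int) else j).toNat
      t.modify dIn (fun row => row.modify dOut (· + 1))) t) init

-- ===== PORT B =====
-- Literal port of B (Source B): zero n×n table, set table[0][0] = n (the diagonal's contribution),
-- then for each x and each x_d in range(x+1, n) add 2 at (x^x_d, sbox[x]^sbox[x_d]).
-- Same hand-port of Python's negative-index wrap for the column index as in port A.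
def difference_distribution_table_alt (sbox : List Int) : List (List Int) :=
  let n := sbox.length
  let table : List (List Int) := (List.range n).map (fun _ => List.replicate n (0 : Int))
  let table := if n ≠ 0 then table.modify 0 (fun row => row.modify 0 (fun _ => (n : Int))) else table
  (List.range n).foldl (fun t (x : Nat) =>
    (List.range' (x + 1) (n - (x + 1))).foldl (fun t (xd : Nat) =>
      let dOut := (let j := PySem.Int.bxor (PySem.List.pyGetD sbox (x : Int) 0)
                     (PySem.List.pyGetD sbox (xd : Int) 0);
                   if j < 0 then j + (n : Int) else j).toNat
      t.modify (x ^^^ xd) (fun row => row.modify dOut (· + 2))) t) table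

-- ===== PRECONDITION & SPEC =====
-- Pre_ is exactly where Python A returns normally: every row index x^x_d stays below n
-- (n a power of two, or n ≤ 1) and every column index sbox[x]^sbox[x_d] lies in [-n, n)
-- (Python accepts a negative index there, wrapping from the end); outside, A raises IndexError.
def Pre_difference_distribution_table (sbox : List Int) : Prop :=
  (∀ x < sbox.length, ∀ xd < sbox.length, x ^^^ xd < sbox.length) ∧
    ∀ a ∈ sbox, ∀ b ∈ sbox,
      -(sbox.length : Int) ≤ PySem.Int.bxor a b ∧ PySem.Int.bxor a b < (sbox.length : Int)
instance (sbox : List Int) : Decidable (Pre_difference_distribution_table sbox) := by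
  unfold Pre_difference_distribution_table; infer_instance

def pvWitness_difference_distribution_table : List Int := [2, 3, 0, 1]

def Spec_difference_distribution_table (sbox : List Int) (out : List (List Int)) : Prop := out = difference_distribution_table_alt sbox
instance (sbox : List Int) (out : List (List Int)) : Decidable (Spec_difference_distribution_table sbox out) := by unfold Spec_difference_distribution_table; infer_instance

-- ===== CLAIM (what is proved, stated in full; the proofs are below) =====
def Claim_equal_difference_distribution_table : Prop := ∀ (sbox : List Int), Dom_difference_distribution_table sbox → Pre_difference_distribution_table sbox → Spec_difference_distribution_table sbox (difference_distribution_table sbox)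

-- ===== LEMMAS AND PROOFS =====

-- the single cell updates the two ports perform
def pvRowInc (row : List Int) (j : Nat) : List Int := row.modify j (· + 1)
def pvInc (t : List (List Int)) (p : Nat × Nat) : List (List Int) :=
  t.modify p.1 (fun row => pvRowInc row p.2)
def pvInc2 (t : List (List Int)) (p : Nat × Nat) : List (List Int) :=
  t.modify p.1 (fun row => row.modify p.2 (· + 2))
-- sbox[x] ^ sbox[xd], wrapped as Python wraps a negative index: the column index both ports compute
def pvOut (sbox : List Int) (x xd : Nat) : Nat :=
  (let j := PySem.Int.bxor (PySem.List.pyGetD sbox (x : Int) 0) (PySem.List.pyGetD sbox (xd : Int) 0)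
   if j < 0 then j + (sbox.length : Int) else j).toNat
-- the (row, column) cell a pair (x, xd) updates
def pvUpd (sbox : List Int) (p : Nat × Nat) : Nat × Nat := (p.1 ^^^ p.2, pvOut sbox p.1 p.2)

lemma pv_modify_comm {α : Type} (f g : α → α) (h : ∀ a, f (g a) = g (f a))
    (l : List α) (i j : Nat) : (l.modify i f).modify j g = (l.modify j g).modify i f := by
  apply List.ext_getElem (by simp)
  intro k hk1 hk2
  simp only [List.getElem_modify]
  by_cases hik : i = k <;> by_cases hjk : j = k <;> simp [hik, hjk, h]

lemma pvInc_comm (t : List (List Int)) (p q : Nat × Nat) :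
    pvInc (pvInc t p) q = pvInc (pvInc t q) p := by
  unfold pvInc
  exact pv_modify_comm _ _ (fun row => pv_modify_comm _ _ (fun a => rfl) row q.2 p.2) t p.1 q.1

-- pvUpd sends the diagonal to (0, 0) …
lemma pvUpd_diag (sbox : List Int) (x : Nat) : pvUpd sbox (x, x) = (0, 0) := by
  simp [pvUpd, pvOut, PySem.Int.bxor_self]

-- … and is symmetric in its two inputs
lemma pvUpd_swap (sbox : List Int) (p : Nat × Nat) : pvUpd sbox (p.2, p.1) = pvUpd sbox p := by
  unfold pvUpd pvOut
  rw [Nat.xor_comm, PySem.Int.bxor_comm]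

-- splitting the square of ordered pairs into diagonal, upper and lower part, up to permutation
lemma pv_trichotomy_perm (l : List (Nat × Nat)) (hl : l.Nodup) :
    l.Perm (l.filter (fun p => decide (p.1 = p.2)) ++
      (l.filter (fun p => decide (p.1 < p.2)) ++ l.filter (fun p => decide (p.2 < p.1)))) := by
  have hset : ∀ a : Nat × Nat, a ∈ l ↔ a ∈ l.filter (fun p => decide (p.1 = p.2)) ++
      (l.filter (fun p => decide (p.1 < p.2)) ++ l.filter (fun p => decide (p.2 < p.1))) := by
    intro a
    simp only [List.mem_append, List.mem_filter, decide_eq_true_eq]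
    constructor
    · intro ha
      rcases Nat.lt_trichotomy a.1 a.2 with h | h | h
      · exact Or.inr (Or.inl ⟨ha, h⟩)
      · exact Or.inl ⟨ha, h⟩
      · exact Or.inr (Or.inr ⟨ha, h⟩)
    · rintro (⟨ha, _⟩ | ⟨ha, _⟩ | ⟨ha, _⟩) <;> exact ha
  have hnd : (l.filter (fun p => decide (p.1 = p.2)) ++
      (l.filter (fun p => decide (p.1 < p.2)) ++ l.filter (fun p => decide (p.2 < p.1)))).Nodup := by
    refine (hl.filter _).append ((hl.filter _).append (hl.filter _) ?_) ?_
    · intro a ha hb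
      simp only [List.mem_filter, decide_eq_true_eq] at ha hb
      omega
    · intro a ha hb
      simp only [List.mem_append, List.mem_filter, decide_eq_true_eq] at ha hb
      omega
  exact (List.perm_ext_iff_of_nodup hl hnd).2 hset

-- the diagonal of range n × range n
lemma pv_diag_perm (n : Nat) :
    ((List.range n ×ˢ List.range n).filter (fun p => decide (p.1 = p.2))).Perm
      ((List.range n).map (fun x => (x, x))) := by
  have hnd1 : ((List.range n ×ˢ List.range n).filter (fun p => decide (p.1 = p.2))).Nodup :=
    ((List.nodup_range).product (List.nodup_range)).filter _
  have hnd2 : ((List.range n).map (fun x => (x, x))).Nodup :=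
    (List.nodup_range).map (fun a b h => (Prod.mk.injEq _ _ _ _ ▸ h).1)
  refine (List.perm_ext_iff_of_nodup hnd1 hnd2).2 ?_
  rintro ⟨a1, a2⟩
  simp only [List.mem_filter, List.mem_product, List.mem_range, List.mem_map,
    decide_eq_true_eq]
  constructor
  · rintro ⟨⟨h1, _⟩, h3⟩
    exact ⟨a1, h1, by rw [h3]⟩
  · rintro ⟨x, hx, h⟩
    obtain ⟨rfl, rfl⟩ := Prod.mk.injEq .. ▸ h
    exact ⟨⟨hx, hx⟩, rfl⟩

-- the lower part is the swapped upper part, up to permutation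
lemma pv_gt_perm (n : Nat) :
    ((List.range n ×ˢ List.range n).filter (fun p => decide (p.2 < p.1))).Perm
      (((List.range n ×ˢ List.range n).filter (fun p => decide (p.1 < p.2))).map
        (fun p => (p.2, p.1))) := by
  have hnd1 : ((List.range n ×ˢ List.range n).filter (fun p => decide (p.2 < p.1))).Nodup :=
    ((List.nodup_range).product (List.nodup_range)).filter _
  have hnd2 : (((List.range n ×ˢ List.range n).filter (fun p => decide (p.1 < p.2))).map
      (fun p : Nat × Nat => (p.2, p.1))).Nodup := by
    refine (((List.nodup_range).product (List.nodup_range)).filter _).map ?_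
    intro a b h
    have h1 := (Prod.mk.injEq _ _ _ _ ▸ h).1
    have h2 := (Prod.mk.injEq _ _ _ _ ▸ h).2
    exact Prod.ext h2 h1
  refine (List.perm_ext_iff_of_nodup hnd1 hnd2).2 ?_
  rintro ⟨a1, a2⟩
  constructor
  · intro hmem
    rw [List.mem_filter, List.mem_product] at hmem
    obtain ⟨⟨h1, h2⟩, hlt⟩ := hmem
    rw [List.mem_map]
    exact ⟨(a2, a1), List.mem_filter.mpr ⟨List.mem_product.mpr ⟨h2, h1⟩, hlt⟩, rfl⟩
  · intro hmem
    rw [List.mem_map] at hmem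
    obtain ⟨⟨p1, p2⟩, hp, h⟩ := hmem
    obtain ⟨rfl, rfl⟩ := Prod.mk.injEq .. ▸ h
    rw [List.mem_filter, List.mem_product] at hp
    rw [List.mem_filter, List.mem_product]
    exact ⟨⟨hp.1.2, hp.1.1⟩, hp.2⟩

-- the elements of range n greater than x form range' (x+1) (n-(x+1))
lemma pv_filter_lt_range (x : Nat) : ∀ n : Nat,
    (List.range n).filter (fun y => decide (x < y)) = List.range' (x + 1) (n - (x + 1)) := by
  intro n
  induction n with
  | zero => simp
  | succ n ih =>
      rw [List.range_succ, List.filter_append, ih]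
      by_cases h : x < n
      · have hf : List.filter (fun y => decide (x < y)) [n] = [n] := by simp [h]
        rw [hf, show n + 1 - (x + 1) = (n - (x + 1)) + 1 by omega, List.range'_concat]
        congr 2
        omega
      · have hf : List.filter (fun y => decide (x < y)) [n] = [] := by simp [h]
        rw [hf, List.append_nil, show n + 1 - (x + 1) = n - (x + 1) by omega]

-- the upper part written as B's double loop
lemma pv_U_eq (n : Nat) :
    (List.range n ×ˢ List.range n).filter (fun p => decide (p.1 < p.2)) =
      (List.range n).flatMap (fun x =>
        (List.range' (x + 1) (n - (x + 1))).map (fun y => (x, y))) := by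
  show ((List.range n).flatMap fun a => (List.range n).map (Prod.mk a)).filter _ = _
  rw [List.filter_flatMap]
  congr 1
  funext x
  rw [List.filter_map, show ((fun p : Nat × Nat => decide (p.1 < p.2)) ∘ Prod.mk x) =
    (fun y => decide (x < y)) from rfl, pv_filter_lt_range]

-- a run of updates that all hit row d is one modification of row d
lemma pv_foldl_row (d : Nat) : ∀ (us : List Nat) (t : List (List Int)),
    List.foldl pvInc t (us.map (fun j => (d, j))) =
      t.modify d (fun row => List.foldl pvRowInc row us) := by
  intro us
  induction us with
  | nil => intro t; exact (List.modify_id d t).symm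
  | cons u us ih =>
      intro t
      simp only [List.map_cons, List.foldl_cons]
      rw [ih]
      show (t.modify d _).modify d _ = _
      rw [List.modify_modify_eq]
      rfl

-- k increments of cell 0 add k to it
lemma pv_rowinc_replicate : ∀ (k : Nat) (row : List Int),
    List.foldl pvRowInc row (List.replicate k 0) = row.modify 0 (· + (k : Int)) := by
  intro k
  induction k with
  | zero =>
      intro row
      show row = row.modify 0 fun x => x + ((0 : Nat) : Int)
      rw [show (fun x : Int => x + ((0 : Nat) : Int)) = id from funext fun a => by simp]
      exact (List.modify_id 0 row).symm
  | succ k ih =>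
      intro row
      rw [List.replicate_succ, List.foldl_cons, ih]
      show (row.modify 0 _).modify 0 _ = _
      rw [List.modify_modify_eq]
      congr 1
      funext a
      simp only [Function.comp_apply]
      push_cast
      ring

-- the diagonal's n updates of (0,0) on the zero table produce exactly B's initial table
lemma pv_t0_eq (n : Nat) :
    List.foldl pvInc ((List.range n).map (fun _ => List.replicate n (0 : Int)))
        (List.replicate n ((0 : Nat), (0 : Nat))) =
      (if n ≠ 0 then
        ((List.range n).map (fun _ => List.replicate n (0 : Int))).modify 0
          (fun row => row.modify 0 (fun _ => (n : Int)))
      else (List.range n).map (fun _ => List.replicate n (0 : Int))) := by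
  have h1 : (List.replicate n ((0 : Nat), (0 : Nat))) =
      (List.replicate n (0 : Nat)).map (fun j => ((0 : Nat), j)) := by
    simp
  rw [h1, pv_foldl_row]
  simp only [pv_rowinc_replicate]
  cases n with
  | zero => simp
  | succ m =>
      rw [if_pos (Nat.succ_ne_zero m)]
      apply List.ext_getElem (by simp)
      intro i hi1 hi2
      simp only [List.getElem_modify, List.getElem_map]
      by_cases h0 : 0 = i
      · subst h0
        rw [if_pos rfl, if_pos rfl]
        apply List.ext_getElem (by simp)
        intro j hj1 hj2
        simp only [List.getElem_modify]
        by_cases hj : 0 = j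
        · subst hj
          simp
        · rw [if_neg hj, if_neg hj]
      · rw [if_neg h0, if_neg h0]

-- a +2 update is two +1 updates of the same cell
lemma pvInc2_eq (t : List (List Int)) (p : Nat × Nat) : pvInc2 t p = pvInc (pvInc t p) p := by
  unfold pvInc2 pvInc pvRowInc
  rw [List.modify_modify_eq]
  congr 1
  funext row
  simp only [Function.comp_apply]
  rw [List.modify_modify_eq]
  congr 1
  funext a
  simp only [Function.comp_apply]
  ring

lemma pv_inc2_double : ∀ (L : List (Nat × Nat)) (t : List (List Int)),
    List.foldl pvInc2 t L = List.foldl pvInc t (L.flatMap (fun p => [p, p])) := by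
  intro L
  induction L with
  | nil => intro t; rfl
  | cons p L ih =>
      intro t
      simp only [List.foldl_cons, List.flatMap_cons, List.cons_append, List.nil_append]
      rw [ih, pvInc2_eq]

lemma pv_dbl_perm : ∀ (L : List (Nat × Nat)), (L.flatMap (fun p => [p, p])).Perm (L ++ L) := by
  intro L
  induction L with
  | nil => simp
  | cons p L ih =>
      simp only [List.flatMap_cons, List.cons_append, List.nil_append]
      exact ((ih.cons p).trans List.perm_middle.symm).cons p

-- port A as one fold of unit updates over all ordered pairs
lemma pv_A_eq (sbox : List Int) :
    difference_distribution_table sbox =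
      List.foldl pvInc
        ((List.range sbox.length).map fun _ => (List.range sbox.length).map fun _ => (0 : Int))
        ((List.range sbox.length ×ˢ List.range sbox.length).map (pvUpd sbox)) := by
  show _ = List.foldl pvInc _ (((List.range sbox.length).flatMap
    fun a => (List.range sbox.length).map (Prod.mk a)).map (pvUpd sbox))
  rw [List.map_flatMap]
  simp only [List.map_map, List.foldl_flatMap, List.foldl_map]
  rfl

-- port B as one fold of +2 updates over the pairs x < xd, from its initial table
lemma pv_B_eq (sbox : List Int) :
    difference_distribution_table_alt sbox =
      List.foldl pvInc2
        (if sbox.length ≠ 0 then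
          ((List.range sbox.length).map (fun _ => List.replicate sbox.length (0 : Int))).modify 0
            (fun row => row.modify 0 (fun _ => (sbox.length : Int)))
        else (List.range sbox.length).map (fun _ => List.replicate sbox.length (0 : Int)))
        ((List.range sbox.length).flatMap (fun x =>
          (List.range' (x + 1) (sbox.length - (x + 1))).map (fun xd => pvUpd sbox (x, xd)))) := by
  simp only [List.foldl_flatMap, List.foldl_map]
  rfl

-- A's inner zero rows are B's replicate rows
lemma pv_init_eq (n : Nat) :
    ((List.range n).map fun _ => (List.range n).map fun _ => (0 : Int)) =
      (List.range n).map (fun _ => List.replicate n (0 : Int)) := by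
  simp [List.map_const']

-- ===== VERDICT (by name: the statement is the Claim_ definition above) =====
theorem difference_distribution_table_spec : Claim_equal_difference_distribution_table := by
  intro sbox _hdom _hpre
  unfold Spec_difference_distribution_table
  haveI : RightCommutative pvInc := ⟨fun t p q => pvInc_comm t p q⟩
  set n := sbox.length with hn
  set P : List (Nat × Nat) := List.range n ×ˢ List.range n with hP
  set U : List (Nat × Nat) := P.filter (fun p => decide (p.1 < p.2)) with hU
  have hPnd : P.Nodup := (List.nodup_range).product (List.nodup_range)
  -- lower-part updates equal upper-part updates, up to permutation
  have hGU : ((P.filter (fun p => decide (p.2 < p.1))).map (pvUpd sbox)).Perm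
      (U.map (pvUpd sbox)) := by
    rw [hP]
    refine ((pv_gt_perm n).map (pvUpd sbox)).trans ?_
    rw [List.map_map]
    refine List.Perm.of_eq (List.map_congr_left ?_)
    intro p _
    exact pvUpd_swap sbox p
  -- diagonal updates are n copies of (0,0)
  have hD : ((P.filter (fun p => decide (p.1 = p.2))).map (pvUpd sbox)).Perm
      (List.replicate n ((0 : Nat), (0 : Nat))) := by
    rw [hP]
    refine ((pv_diag_perm n).map (pvUpd sbox)).trans ?_
    rw [List.map_map]
    refine List.Perm.of_eq ?_
    rw [show ((pvUpd sbox) ∘ fun x => (x, x)) = (fun _ : Nat => ((0 : Nat), (0 : Nat))) from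
      funext fun x => pvUpd_diag sbox x, List.map_const', List.length_range]
  -- A's whole update list, up to permutation: diagonal ++ upper ++ upper
  have hperm : (P.map (pvUpd sbox)).Perm
      (List.replicate n ((0 : Nat), (0 : Nat)) ++ (U.map (pvUpd sbox) ++ U.map (pvUpd sbox))) := by
    refine ((pv_trichotomy_perm P hPnd).map (pvUpd sbox)).trans ?_
    simp only [List.map_append]
    exact hD.append ((List.Perm.refl _).append hGU)
  have hUmap : U.map (pvUpd sbox) = (List.range n).flatMap (fun x =>
      (List.range' (x + 1) (n - (x + 1))).map (fun xd => pvUpd sbox (x, xd))) := by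
    rw [hU, hP, pv_U_eq, List.map_flatMap]
    simp only [List.map_map]
    rfl
  rw [pv_A_eq, pv_B_eq, ← hn, ← hP, pv_init_eq]
  rw [hperm.foldl_eq, List.foldl_append, pv_t0_eq]
  rw [pv_inc2_double, (pv_dbl_perm _).foldl_eq]
  rw [hUmap]
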